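-- pv_equiv track=rewrite | github.com/IlmaJaganjac/abn-rag | backend/app/pipeline.py | _canonical_company
-- ===== SOURCE A (Python) =====
-- KNOWN_COMPANY_ALIASES = {
--     "ASML": ("asml",),
--     "ABN AMRO": ("abn amro", "abn-amro"),
--     "SHELL": ("shell",),
--     "CM": ("cm.com", "cm com"),
--     "HEINEKEN": ("heineken",),
--     "TESLA": ("tesla",),
--     "APPLE": ("apple",),
--     "MICROSOFT": ("microsoft",),
--     "GOOGLE": ("google", "alphabet"),
-- }
--
-- def _canonical_company(company: str | None) -> str | None:
--     if company is None:
--         return None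
--     company_key = company.casefold().strip()
--     for canonical, aliases in KNOWN_COMPANY_ALIASES.items():
--         if company_key == canonical.casefold() or company_key in aliases:
--             return canonical
--     return company.strip()
-- ===== SOURCE B (Python) =====
-- KNOWN_COMPANY_ALIASES = {
--     "ASML": ("asml",),
--     "ABN AMRO": ("abn amro", "abn-amro"),
--     "SHELL": ("shell",),
--     "CM": ("cm.com", "cm com"),
--     "HEINEKEN": ("heineken",),
--     "TESLA": ("tesla",),
--     "APPLE": ("apple",),
--     "MICROSOFT": ("microsoft",),
--     "GOOGLE": ("google", "alphabet"),
-- }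
--
-- # Flat inverted index built once: every key (casefolded canonical or alias) -> canonical.
-- CANON_BY_ALIAS = {}
-- for _canonical, _aliases in KNOWN_COMPANY_ALIASES.items():
--     CANON_BY_ALIAS[_canonical.casefold()] = _canonical
--     for _alias in _aliases:
--         CANON_BY_ALIAS[_alias] = _canonical
--
-- def _canonical_company(company):
--     if company is None:
--         return None
--     return CANON_BY_ALIAS.get(company.casefold().strip(), company.strip())
-- ===== Notes on version B (the rewrite author's own statement) =====
-- stated objective: idiomatic
-- what changed: Replaces A's per-call linear scan over the alias table (with a membership test per entry) by a flat inverted dict CANON_BY_ALIAS built once at module load, so the function body is a single hash lookup with the stripped name as default.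
import Mathlib
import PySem

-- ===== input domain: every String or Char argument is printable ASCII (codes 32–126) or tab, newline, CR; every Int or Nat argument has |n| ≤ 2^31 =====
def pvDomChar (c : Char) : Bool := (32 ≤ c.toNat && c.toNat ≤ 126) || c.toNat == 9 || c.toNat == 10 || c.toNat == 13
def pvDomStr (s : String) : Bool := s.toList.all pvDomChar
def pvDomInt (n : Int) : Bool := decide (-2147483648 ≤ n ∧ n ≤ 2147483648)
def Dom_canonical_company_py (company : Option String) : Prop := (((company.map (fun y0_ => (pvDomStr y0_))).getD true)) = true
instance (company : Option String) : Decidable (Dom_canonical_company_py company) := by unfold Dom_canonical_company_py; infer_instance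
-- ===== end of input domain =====

-- B replaces A's per-call scan over the alias table by a single lookup in a flat
-- inverted index built once (objective: idiomatic/faster-constant).
-- casefold is ported as ASCII lower: exact on the printable-ASCII domain Dom.

-- shared module constant KNOWN_COMPANY_ALIASES
def knownCompanyAliases : List (String × List String) :=
  [("ASML", ["asml"]),
   ("ABN AMRO", ["abn amro", "abn-amro"]),
   ("SHELL", ["shell"]),
   ("CM", ["cm.com", "cm com"]),
   ("HEINEKEN", ["heineken"]),
   ("TESLA", ["tesla"]),
   ("APPLE", ["apple"]),
   ("MICROSOFT", ["microsoft"]),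
   ("GOOGLE", ["google", "alphabet"])]

-- ===== PORT A =====
-- the 'for canonical, aliases in ….items(): if … : return canonical' loop
def findCanonA (key : String) : List (String × List String) → Option String
  | [] => none
  | (canonical, aliases) :: rest =>
    if key = PySem.Str.lower canonical ∨ key ∈ aliases then some canonical
    else findCanonA key rest

def canonical_company_py (company : Option String) : Option String :=
  match company with
  | none => none
  | some c =>
    let companyKey := PySem.Str.strip (PySem.Str.lower c)
    match findCanonA companyKey knownCompanyAliases with
    | some canonical => some canonical
    | none => some (PySem.Str.strip c)

-- ===== PORT B =====
-- CANON_BY_ALIAS: flat inverted index built once from the alias table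
def canonByAlias : PySem.Dict String String :=
  knownCompanyAliases.foldl
    (fun d p => p.2.foldl (fun d a => d.insert a p.1) (d.insert (PySem.Str.lower p.1) p.1))
    PySem.Dict.empty

def canonical_company_py_alt (company : Option String) : Option String :=
  match company with
  | none => none
  | some c =>
    some (canonByAlias.getD (PySem.Str.strip (PySem.Str.lower c)) (PySem.Str.strip c))

-- ===== PRECONDITION & SPEC =====
def Spec_canonical_company_py (company : Option String) (out : Option String) : Prop := out = canonical_company_py_alt company
instance (company : Option String) (out : Option String) : Decidable (Spec_canonical_company_py company out) := by unfold Spec_canonical_company_py; infer_instance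

-- ===== CLAIM (what is proved, stated in full; the proofs are below) =====
def Claim_equal_canonical_company_py : Prop := ∀ (company : Option String), Dom_canonical_company_py company → Spec_canonical_company_py company (canonical_company_py company)

-- ===== LEMMAS AND PROOFS =====

-- the core fact: A's first-match scan and B's flat-index lookup agree for every key
theorem core_eq (key d : String) :
    (match findCanonA key knownCompanyAliases with
     | some canonical => some canonical
     | none => some d) = some (canonByAlias.getD key d) := by
  by_cases h1 : key = "asml"
  · subst h1; rfl
  by_cases h2 : key = "abn amro"
  · subst h2; rfl
  by_cases h3 : key = "abn-amro"
  · subst h3; rfl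
  by_cases h4 : key = "shell"
  · subst h4; rfl
  by_cases h5 : key = "cm"
  · subst h5; rfl
  by_cases h6 : key = "cm.com"
  · subst h6; rfl
  by_cases h7 : key = "cm com"
  · subst h7; rfl
  by_cases h8 : key = "heineken"
  · subst h8; rfl
  by_cases h9 : key = "tesla"
  · subst h9; rfl
  by_cases h10 : key = "apple"
  · subst h10; rfl
  by_cases h11 : key = "microsoft"
  · subst h11; rfl
  by_cases h12 : key = "google"
  · subst h12; rfl
  by_cases h13 : key = "alphabet"
  · subst h13; rfl
  · -- key matches no entry: A falls through its loop, B's lookup hits the default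
    have hA : findCanonA key knownCompanyAliases = none := by
      simp only [findCanonA, knownCompanyAliases,
        show PySem.Str.lower "ASML" = "asml" from rfl,
        show PySem.Str.lower "ABN AMRO" = "abn amro" from rfl,
        show PySem.Str.lower "SHELL" = "shell" from rfl,
        show PySem.Str.lower "CM" = "cm" from rfl,
        show PySem.Str.lower "HEINEKEN" = "heineken" from rfl,
        show PySem.Str.lower "TESLA" = "tesla" from rfl,
        show PySem.Str.lower "APPLE" = "apple" from rfl,
        show PySem.Str.lower "MICROSOFT" = "microsoft" from rfl,
        show PySem.Str.lower "GOOGLE" = "google" from rfl]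
      simp [h1, h2, h3, h4, h5, h6, h7, h8, h9, h10, h11, h12, h13]
    have e : canonByAlias =
        ((((((((((((((((PySem.Dict.empty : PySem.Dict String String).insert "asml" "ASML").insert
          "abn amro" "ABN AMRO").insert "abn amro" "ABN AMRO").insert "abn-amro" "ABN AMRO").insert
          "shell" "SHELL").insert "cm" "CM").insert "cm.com" "CM").insert "cm com" "CM").insert
          "heineken" "HEINEKEN").insert "tesla" "TESLA").insert "apple" "APPLE").insert
          "microsoft" "MICROSOFT").insert "google" "GOOGLE").insert "google" "GOOGLE").insert
          "alphabet" "GOOGLE") := by rfl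
    have hB : canonByAlias.getD key d = d := by
      rw [e, PySem.Dict.getD_insert_of_ne _ _ _ h13, PySem.Dict.getD_insert_of_ne _ _ _ h12,
        PySem.Dict.getD_insert_of_ne _ _ _ h12, PySem.Dict.getD_insert_of_ne _ _ _ h11,
        PySem.Dict.getD_insert_of_ne _ _ _ h10, PySem.Dict.getD_insert_of_ne _ _ _ h9,
        PySem.Dict.getD_insert_of_ne _ _ _ h8, PySem.Dict.getD_insert_of_ne _ _ _ h7,
        PySem.Dict.getD_insert_of_ne _ _ _ h6, PySem.Dict.getD_insert_of_ne _ _ _ h5,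
        PySem.Dict.getD_insert_of_ne _ _ _ h4, PySem.Dict.getD_insert_of_ne _ _ _ h3,
        PySem.Dict.getD_insert_of_ne _ _ _ h2, PySem.Dict.getD_insert_of_ne _ _ _ h2,
        PySem.Dict.getD_insert_of_ne _ _ _ h1, PySem.Dict.getD_empty]
    rw [hA, hB]

-- ===== VERDICT (by name: the statement is the Claim_ definition above) =====
theorem canonical_company_py_spec : Claim_equal_canonical_company_py := by
  intro company _
  unfold Spec_canonical_company_py canonical_company_py canonical_company_py_alt
  cases company with
  | none => rfl
  | some c => exact core_eq (PySem.Str.strip (PySem.Str.lower c)) (PySem.Str.strip c)
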